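-- pv_equiv track=rewrite | github.com/YQP-2511/maphub-core | ogc_mcp_server/tools/wmts_layer_tool.py | _select_best_tile_matrix_set
-- ===== SOURCE A (Python) =====
-- def _select_best_tile_matrix_set(available_matrix_sets: list) -> str:
--     """自动选择最佳的瓦片矩阵集
--
--     Args:
--         available_matrix_sets: 可用的瓦片矩阵集列表
--
--     Returns:
--         选择的瓦片矩阵集名称
--     """
--     if not available_matrix_sets:
--         return "GoogleMapsCompatible"  # 默认值
--
--     # 优先级顺序
--     preferred_order = [
--         "GoogleMapsCompatible",
--         "EPSG:3857",
--         "EPSG:4326",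
--         "WebMercatorQuad",
--         "WGS84"
--     ]
--
--     # 按优先级选择
--     for preferred in preferred_order:
--         if preferred in available_matrix_sets:
--             return preferred
--
--     # 如果没有匹配的，返回第一个可用的
--     return available_matrix_sets[0]
-- ===== SOURCE B (Python) =====
-- _PREFERRED_ORDER = [
--     "GoogleMapsCompatible",
--     "EPSG:3857",
--     "EPSG:4326",
--     "WebMercatorQuad",
--     "WGS84",
-- ]
--
-- _RANK = {name: i for i, name in enumerate(_PREFERRED_ORDER)}
--
--
-- def _select_best_tile_matrix_set(available_matrix_sets: list) -> str:
--     if not available_matrix_sets: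
--         return "GoogleMapsCompatible"
--     n = len(_PREFERRED_ORDER)
--     return min(available_matrix_sets, key=lambda s: _RANK.get(s, n))
-- ===== Notes on version B (the rewrite author's own statement) =====
-- stated objective: alternative
-- what changed: Replaced A's scan over the priority list with an inner membership scan of the input by a precomputed name-to-rank dict and a single min-by-rank pass over the input list.
import Mathlib
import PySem

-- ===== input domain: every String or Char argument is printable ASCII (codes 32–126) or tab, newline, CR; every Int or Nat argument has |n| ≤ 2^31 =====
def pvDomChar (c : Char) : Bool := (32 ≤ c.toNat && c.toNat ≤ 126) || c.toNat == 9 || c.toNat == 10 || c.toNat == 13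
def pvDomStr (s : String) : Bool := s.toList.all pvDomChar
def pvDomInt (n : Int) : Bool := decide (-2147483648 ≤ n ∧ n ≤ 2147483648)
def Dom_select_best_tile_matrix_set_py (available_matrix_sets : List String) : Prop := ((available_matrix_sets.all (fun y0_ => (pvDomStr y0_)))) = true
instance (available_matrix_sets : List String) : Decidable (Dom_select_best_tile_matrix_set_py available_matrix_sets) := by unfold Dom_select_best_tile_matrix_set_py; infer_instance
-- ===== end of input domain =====

-- B replaces A's scan over the priority list (with an inner membership scan) by a
-- precomputed name→rank dict and a single min-by-rank pass over the input (objective: alternative).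

-- ===== PORT A =====
-- A's priority list
def pvPreferredOrder : List String :=
  ["GoogleMapsCompatible", "EPSG:3857", "EPSG:4326", "WebMercatorQuad", "WGS84"]

-- the 'for preferred in preferred_order: if preferred in available: return preferred' loop
def pvALoop : List String → List String → Option String
  | [], _ => none
  | p :: rest, xs => if p ∈ xs then some p else pvALoop rest xs

def select_best_tile_matrix_set_py (available_matrix_sets : List String) : String :=
  if available_matrix_sets = [] then "GoogleMapsCompatible"
  else
    match pvALoop pvPreferredOrder available_matrix_sets with
    | some p => p
    | none => available_matrix_sets.headD ""   -- available_matrix_sets[0]; list nonempty here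

-- ===== PORT B =====
def pvOrderAlt : List String :=
  ["GoogleMapsCompatible", "EPSG:3857", "EPSG:4326", "WebMercatorQuad", "WGS84"]

-- _RANK = {name: i for i, name in enumerate(_PREFERRED_ORDER)}
def pvRankDict : PySem.Dict String Int :=
  (PySem.List.enumerate pvOrderAlt).foldl (fun d p => d.insert p.2 p.1) PySem.Dict.empty

-- key=lambda s: _RANK.get(s, n)  with n = len(order)
def pvRankOf (s : String) : Int := pvRankDict.getD s (pvOrderAlt.length : Int)

-- min(available, key=…): first element with strictly smallest key
def select_best_tile_matrix_set_py_alt (available_matrix_sets : List String) : String :=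
  match available_matrix_sets with
  | [] => "GoogleMapsCompatible"
  | h :: t => t.foldl (fun best x => if pvRankOf x < pvRankOf best then x else best) h

-- ===== PRECONDITION & SPEC =====
def Spec_select_best_tile_matrix_set_py (available_matrix_sets : List String) (out : String) : Prop := out = select_best_tile_matrix_set_py_alt available_matrix_sets
instance (available_matrix_sets : List String) (out : String) : Decidable (Spec_select_best_tile_matrix_set_py available_matrix_sets out) := by unfold Spec_select_best_tile_matrix_set_py; infer_instance

-- ===== CLAIM (what is proved, stated in full; the proofs are below) =====
def Claim_equal_select_best_tile_matrix_set_py : Prop := ∀ (available_matrix_sets : List String), Dom_select_best_tile_matrix_set_py available_matrix_sets → Spec_select_best_tile_matrix_set_py available_matrix_sets (select_best_tile_matrix_set_py available_matrix_sets)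

-- ===== LEMMAS AND PROOFS =====

-- the rank function in closed form
theorem pvRankOf_char (s : String) :
    pvRankOf s =
      if s = "GoogleMapsCompatible" then 0
      else if s = "EPSG:3857" then 1
      else if s = "EPSG:4326" then 2
      else if s = "WebMercatorQuad" then 3
      else if s = "WGS84" then 4
      else 5 := by
  have hd : pvRankDict = PySem.Dict.mk
      [("GoogleMapsCompatible", (0 : Int)), ("EPSG:3857", 1), ("EPSG:4326", 2),
       ("WebMercatorQuad", 3), ("WGS84", 4)] := by decide
  simp only [pvRankOf, hd, PySem.Dict.getD, PySem.Dict.get?_mk_cons, pvOrderAlt]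
  split_ifs <;> simp_all [PySem.Dict.get?]

theorem pvFold_mem (t : List String) (h : String) :
    t.foldl (fun best x => if pvRankOf x < pvRankOf best then x else best) h ∈ h :: t := by
  induction t generalizing h with
  | nil => simp
  | cons y t ih =>
    simp only [List.foldl_cons]
    by_cases hif : pvRankOf y < pvRankOf h
    · rw [if_pos hif]
      rcases List.mem_cons.mp (ih y) with hm | hm <;> simp [hm]
    · rw [if_neg hif]
      rcases List.mem_cons.mp (ih h) with hm | hm <;> simp [hm]

theorem pvFold_min (t : List String) (h : String) :
    ∀ x ∈ h :: t,
      pvRankOf (t.foldl (fun best x => if pvRankOf x < pvRankOf best then x else best) h) ≤ pvRankOf x := by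
  induction t generalizing h with
  | nil => intro x hx; simp at hx; simp [hx]
  | cons y t ih =>
    intro x hx
    simp only [List.foldl_cons]
    have key : pvRankOf (if pvRankOf y < pvRankOf h then y else h) ≤ pvRankOf h ∧
               pvRankOf (if pvRankOf y < pvRankOf h then y else h) ≤ pvRankOf y := by
      split_ifs with hlt <;> constructor <;> omega
    have ihh := ih (if pvRankOf y < pvRankOf h then y else h)
    have hhead := ihh _ (List.mem_cons_self ..)
    rcases List.mem_cons.mp hx with rfl | hx
    · exact le_trans hhead key.1
    rcases List.mem_cons.mp hx with rfl | hx
    · exact le_trans hhead key.2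
    · exact ihh _ (List.mem_cons_of_mem _ hx)

theorem pvFold_const (t : List String) (h : String)
    (hall : ∀ x ∈ t, ¬ pvRankOf x < pvRankOf h) :
    t.foldl (fun best x => if pvRankOf x < pvRankOf best then x else best) h = h := by
  induction t with
  | nil => rfl
  | cons y t ih =>
    simp only [List.foldl_cons]
    rw [if_neg (hall y (by simp))]
    exact ih fun x hx => hall x (by simp [hx])

-- ===== VERDICT (by name: the statement is the Claim_ definition above) =====
theorem select_best_tile_matrix_set_py_spec : Claim_equal_select_best_tile_matrix_set_py := by
  intro xs _
  unfold Spec_select_best_tile_matrix_set_py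
  match xs with
  | [] => rfl
  | h :: t =>
    simp only [select_best_tile_matrix_set_py, select_best_tile_matrix_set_py_alt,
      pvALoop, pvPreferredOrder, if_neg (List.cons_ne_nil h t)]
    set b := t.foldl (fun best x => if pvRankOf x < pvRankOf best then x else best) h with hb
    have hmem : b ∈ h :: t := pvFold_mem t h
    have hmin : ∀ x ∈ h :: t, pvRankOf b ≤ pvRankOf x := pvFold_min t h
    have hbchar := pvRankOf_char b
    by_cases h0 : ("GoogleMapsCompatible" : String) ∈ h :: t
    · have hle : pvRankOf b ≤ 0 := by
        have := hmin _ h0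
        rwa [show pvRankOf "GoogleMapsCompatible" = 0 from by decide] at this
      split_ifs at hbchar with e0 e1 e2 e3 e4
      · simp [h0, e0]
      all_goals omega
    by_cases h1 : ("EPSG:3857" : String) ∈ h :: t
    · have hle : pvRankOf b ≤ 1 := by
        have := hmin _ h1
        rwa [show pvRankOf "EPSG:3857" = 1 from by decide] at this
      split_ifs at hbchar with e0 e1 e2 e3 e4
      · exact absurd (e0 ▸ hmem) h0
      · simp [h0, h1, e1]
      all_goals omega
    by_cases h2 : ("EPSG:4326" : String) ∈ h :: t
    · have hle : pvRankOf b ≤ 2 := by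
        have := hmin _ h2
        rwa [show pvRankOf "EPSG:4326" = 2 from by decide] at this
      split_ifs at hbchar with e0 e1 e2 e3 e4
      · exact absurd (e0 ▸ hmem) h0
      · exact absurd (e1 ▸ hmem) h1
      · simp [h0, h1, h2, e2]
      all_goals omega
    by_cases h3 : ("WebMercatorQuad" : String) ∈ h :: t
    · have hle : pvRankOf b ≤ 3 := by
        have := hmin _ h3
        rwa [show pvRankOf "WebMercatorQuad" = 3 from by decide] at this
      split_ifs at hbchar with e0 e1 e2 e3 e4
      · exact absurd (e0 ▸ hmem) h0
      · exact absurd (e1 ▸ hmem) h1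
      · exact absurd (e2 ▸ hmem) h2
      · simp [h0, h1, h2, h3, e3]
      all_goals omega
    by_cases h4 : ("WGS84" : String) ∈ h :: t
    · have hle : pvRankOf b ≤ 4 := by
        have := hmin _ h4
        rwa [show pvRankOf "WGS84" = 4 from by decide] at this
      split_ifs at hbchar with e0 e1 e2 e3 e4
      · exact absurd (e0 ▸ hmem) h0
      · exact absurd (e1 ▸ hmem) h1
      · exact absurd (e2 ▸ hmem) h2
      · exact absurd (e3 ▸ hmem) h3
      · simp [h0, h1, h2, h3, h4, e4]
      · omega
    · -- no preferred name present: every rank is 5, the min pass keeps the head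
      have hall : ∀ x ∈ h :: t, pvRankOf x = 5 := by
        intro x hx
        have hc := pvRankOf_char x
        split_ifs at hc with e0 e1 e2 e3 e4
        · exact absurd (e0 ▸ hx) h0
        · exact absurd (e1 ▸ hx) h1
        · exact absurd (e2 ▸ hx) h2
        · exact absurd (e3 ▸ hx) h3
        · exact absurd (e4 ▸ hx) h4
        · exact hc
      have hbh : b = h := by
        rw [hb]
        exact pvFold_const t h fun x hx => by
          rw [hall x (by simp [hx]), hall h (by simp)]; omega
      simp [h0, h1, h2, h3, h4, hbh]
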